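-- pv_equiv track=rewrite | github.com/earthlume/withers | withers_scenes/render.py | text_cols
-- ===== SOURCE A (Python) =====
-- FONT = {
--  'A':["010","101","111","101","101"],'B':["110","101","110","101","110"],
--  'C':["011","100","100","100","011"],'D':["110","101","101","101","110"],
--  'E':["111","100","110","100","111"],'F':["111","100","110","100","100"],
--  'G':["011","100","101","101","011"],'H':["101","101","111","101","101"],
--  'I':["111","010","010","010","111"],'J':["001","001","001","101","110"],
--  'K':["101","110","100","110","101"],'L':["100","100","100","100","111"],
--  'M':["10001","11011","10101","10001","10001"],'N':["1001","1101","1011","1001","1001"],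
--  'O':["010","101","101","101","010"],'P':["110","101","110","100","100"],
--  'Q':["010","101","101","110","011"],'R':["110","101","110","101","101"],
--  'S':["011","100","010","001","110"],'T':["111","010","010","010","010"],
--  'U':["101","101","101","101","011"],'V':["101","101","101","101","010"],
--  'W':["10001","10001","10101","11011","10001"],'X':["101","101","010","101","101"],
--  'Y':["101","101","010","010","010"],'Z':["111","001","010","100","111"],
--  ' ':["00","00","00","00","00"],'.':["0","0","0","0","1"],
--  ',':["0","0","0","1","1"],"'":["1","1","0","0","0"],
--  '!':["1","1","1","0","1"],':':["0","1","0","1","0"],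
-- }
--
-- def text_cols(text):
--     cols = []
--     for ch in text:
--         g = FONT.get(ch, FONT[' '])
--         for c in range(len(g[0])):
--             col = [0]*8
--             for r in range(5):
--                 if c < len(g[r]) and g[r][c] == '1': col[r+2] = 1
--             cols.append(col)
--         cols.append([0]*8)
--     return cols
-- ===== SOURCE B (Python) =====
-- # Column-major bitmask font: each glyph is a list of 5-bit column masks
-- # (bit r = pixel in glyph row r), precomputed from the same 5-row font art.
-- COLS = {
--  'A':[30,5,30],'B':[31,21,10],'C':[14,17,17],'D':[31,17,14],
--  'E':[31,21,17],'F':[31,5,1],'G':[14,17,29],'H':[31,4,31],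
--  'I':[17,31,17],'J':[24,16,15],'K':[31,10,17],'L':[31,16,16],
--  'M':[31,2,4,2,31],'N':[31,2,4,31],'O':[14,17,14],'P':[31,5,2],
--  'Q':[14,25,22],'R':[31,5,26],'S':[18,21,9],'T':[1,31,1],
--  'U':[15,16,31],'V':[15,16,15],'W':[31,8,4,8,31],'X':[27,4,27],
--  'Y':[3,28,3],'Z':[25,21,19],' ':[0,0],'.':[16],
--  ',':[24],"'":[3],'!':[23],':':[10],
-- }
--
-- def text_cols(text):
--     out = []
--     for ch in text:
--         for m in COLS.get(ch, COLS[' ']) + [0]: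
--             out.append([0, 0] + [(m >> r) & 1 for r in range(5)] + [0])
--     return out
-- ===== Notes on version B (the rewrite author's own statement) =====
-- stated objective: alternative
-- what changed: B replaces the row-string font and per-column/per-row pixel scans by a precomputed column-major bitmask font (one 5-bit int per glyph column) and emits each output column by decoding the mask bits with shifts, instead of A's nested column/row indexing into the glyph row strings.
import Mathlib
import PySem

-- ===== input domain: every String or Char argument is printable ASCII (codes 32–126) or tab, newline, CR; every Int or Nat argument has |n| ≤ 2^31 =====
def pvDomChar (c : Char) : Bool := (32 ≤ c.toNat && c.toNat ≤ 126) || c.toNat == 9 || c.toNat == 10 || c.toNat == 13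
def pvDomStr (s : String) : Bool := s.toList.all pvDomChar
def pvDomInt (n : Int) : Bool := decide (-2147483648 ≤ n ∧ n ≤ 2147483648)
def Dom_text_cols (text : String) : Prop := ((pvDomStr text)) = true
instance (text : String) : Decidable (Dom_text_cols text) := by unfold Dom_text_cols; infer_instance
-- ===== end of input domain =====

-- B uses a precomputed column-major bitmask font (one 5-bit int per glyph column) decoded with
-- shifts, instead of A's row-string font with nested column/row pixel scans (objective: alternative).

-- ===== PORT A =====
-- the FONT dict, module constant of A
def FONT : PySem.Dict Char (List String) := PySem.Dict.ofList [
 ('A',["010","101","111","101","101"]),('B',["110","101","110","101","110"]),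
 ('C',["011","100","100","100","011"]),('D',["110","101","101","101","110"]),
 ('E',["111","100","110","100","111"]),('F',["111","100","110","100","100"]),
 ('G',["011","100","101","101","011"]),('H',["101","101","111","101","101"]),
 ('I',["111","010","010","010","111"]),('J',["001","001","001","101","110"]),
 ('K',["101","110","100","110","101"]),('L',["100","100","100","100","111"]),
 ('M',["10001","11011","10101","10001","10001"]),('N',["1001","1101","1011","1001","1001"]),
 ('O',["010","101","101","101","010"]),('P',["110","101","110","100","100"]),
 ('Q',["010","101","101","110","011"]),('R',["110","101","110","101","101"]),
 ('S',["011","100","010","001","110"]),('T',["111","010","010","010","010"]),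
 ('U',["101","101","101","101","011"]),('V',["101","101","101","101","010"]),
 ('W',["10001","10001","10101","11011","10001"]),('X',["101","101","010","101","101"]),
 ('Y',["101","101","010","010","010"]),('Z',["111","001","010","100","111"]),
 (' ',["00","00","00","00","00"]),('.',["0","0","0","0","1"]),
 (',',["0","0","0","1","1"]),('\'',["1","1","0","0","0"]),
 ('!',["1","1","1","0","1"]),(':',["0","1","0","1","0"])]

-- FONT.get(ch, FONT[' ']); the key ' ' is present, so the inner .getD [] never falls through
def glyph (ch : Char) : List String :=
  (PySem.Dict.get? FONT ch).getD ((PySem.Dict.get? FONT ' ').getD [])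

-- the body "col = [0]*8; for r in range(5): if c < len(g[r]) and g[r][c] == '1': col[r+2] = 1";
-- g[r] with 0 ≤ r < 5 = len(g) is always in range, so the total pyGetD/pySetD forms are exact
def colA (g : List String) (c : Int) : List Int :=
  (PySem.List.pyRange 0 5 1).foldl (fun col r =>
    let row := PySem.List.pyGetD g r ""
    if c < PySem.Str.len row ∧ PySem.Str.pyGet? row c = some '1'
    then PySem.List.pySetD col (r + 2) 1 else col) (List.replicate 8 0)

def text_cols (text : String) : List (List Int) :=
  text.toList.foldl (fun cols ch =>
    let g := glyph ch
    let cols := (PySem.List.pyRange 0 (PySem.Str.len (PySem.List.pyGetD g 0 "")) 1).foldl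
      (fun cols c => cols ++ [colA g c]) cols
    cols ++ [List.replicate 8 0]) []

-- ===== PORT B =====
-- the COLS dict of Source B: per character the list of 5-bit column masks (bit r = pixel in row r)
def COLS : PySem.Dict Char (List Int) := PySem.Dict.ofList [
 ('A',[30,5,30]),('B',[31,21,10]),('C',[14,17,17]),('D',[31,17,14]),
 ('E',[31,21,17]),('F',[31,5,1]),('G',[14,17,29]),('H',[31,4,31]),
 ('I',[17,31,17]),('J',[24,16,15]),('K',[31,10,17]),('L',[31,16,16]),
 ('M',[31,2,4,2,31]),('N',[31,2,4,31]),('O',[14,17,14]),('P',[31,5,2]),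
 ('Q',[14,25,22]),('R',[31,5,26]),('S',[18,21,9]),('T',[1,31,1]),
 ('U',[15,16,31]),('V',[15,16,15]),('W',[31,8,4,8,31]),('X',[27,4,27]),
 ('Y',[3,28,3]),('Z',[25,21,19]),(' ',[0,0]),('.',[16]),
 (',',[24]),('\'',[3]),('!',[23]),(':',[10])]

-- "[0, 0] + [(m >> r) & 1 for r in range(5)] + [0]"; m >> r is Lean's >>>, & is PySem.Int.band
def colB (m : Int) : List Int :=
  ([0, 0] : List Int) ++ (List.range 5).map (fun r => PySem.Int.band (m >>> r) 1) ++ [0]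

def text_cols_alt (text : String) : List (List Int) :=
  text.toList.foldl (fun out ch =>
    (((PySem.Dict.get? COLS ch).getD ((PySem.Dict.get? COLS ' ').getD [])) ++ [0]).foldl
      (fun out m => out ++ [colB m]) out) []

-- ===== PRECONDITION & SPEC =====
def Spec_text_cols (text : String) (out : List (List Int)) : Prop := out = text_cols_alt text
instance (text : String) (out : List (List Int)) : Decidable (Spec_text_cols text out) := by unfold Spec_text_cols; infer_instance

-- ===== CLAIM =====
def Claim_equal_text_cols : Prop := ∀ (text : String), Dom_text_cols text → Spec_text_cols text (text_cols text)

-- ===== LEMMAS AND PROOFS =====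

set_option maxRecDepth 100000
set_option maxHeartbeats 1000000

-- A's per-character block as a function of the glyph
def charA (g : List String) : List (List Int) :=
  (PySem.List.pyRange 0 (PySem.Str.len (PySem.List.pyGetD g 0 "")) 1).map (colA g)
    ++ [List.replicate 8 0]

-- the two font tables side by side
def pairedFont : List (Char × List String × List Int) := [
 ('A',(["010","101","111","101","101"],[30,5,30])),('B',(["110","101","110","101","110"],[31,21,10])),
 ('C',(["011","100","100","100","011"],[14,17,17])),('D',(["110","101","101","101","110"],[31,17,14])),
 ('E',(["111","100","110","100","111"],[31,21,17])),('F',(["111","100","110","100","100"],[31,5,1])),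
 ('G',(["011","100","101","101","011"],[14,17,29])),('H',(["101","101","111","101","101"],[31,4,31])),
 ('I',(["111","010","010","010","111"],[17,31,17])),('J',(["001","001","001","101","110"],[24,16,15])),
 ('K',(["101","110","100","110","101"],[31,10,17])),('L',(["100","100","100","100","111"],[31,16,16])),
 ('M',(["10001","11011","10101","10001","10001"],[31,2,4,2,31])),('N',(["1001","1101","1011","1001","1001"],[31,2,4,31])),
 ('O',(["010","101","101","101","010"],[14,17,14])),('P',(["110","101","110","100","100"],[31,5,2])),
 ('Q',(["010","101","101","110","011"],[14,25,22])),('R',(["110","101","110","101","101"],[31,5,26])),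
 ('S',(["011","100","010","001","110"],[18,21,9])),('T',(["111","010","010","010","010"],[1,31,1])),
 ('U',(["101","101","101","101","011"],[15,16,31])),('V',(["101","101","101","101","010"],[15,16,15])),
 ('W',(["10001","10001","10101","11011","10001"],[31,8,4,8,31])),('X',(["101","101","010","101","101"],[27,4,27])),
 ('Y',(["101","101","010","010","010"],[3,28,3])),('Z',(["111","001","010","100","111"],[25,21,19])),
 (' ',(["00","00","00","00","00"],[0,0])),('.',(["0","0","0","0","1"],[16])),
 (',',(["0","0","0","1","1"],[24])),('\'',(["1","1","0","0","0"],[3])),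
 ('!',(["1","1","1","0","1"],[23])),(':',(["0","1","0","1","0"],[10]))]

lemma font_eq_paired : FONT = PySem.Dict.mk (pairedFont.map (fun e : Char × List String × List Int => (e.1, e.2.1))) := by decide

lemma cols_eq_paired : COLS = PySem.Dict.mk (pairedFont.map (fun e : Char × List String × List Int => (e.1, e.2.2))) := by decide

-- generic: the two per-character blocks agree when every table entry (and the fallback) agrees
lemma block_eq_of_paired (L : List (Char × List String × List Int))
    (h : ∀ e ∈ L, charA e.2.1 = (e.2.2 ++ [0]).map colB)
    (dA : List String) (dB : List Int) (hd : charA dA = (dB ++ [0]).map colB) (ch : Char) :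
    charA (((PySem.Dict.mk (L.map (fun e : Char × List String × List Int => (e.1, e.2.1)))).get? ch).getD dA)
      = (((((PySem.Dict.mk (L.map (fun e : Char × List String × List Int => (e.1, e.2.2)))).get? ch).getD dB)) ++ [0]).map colB := by
  induction L with
  | nil => simpa [PySem.Dict.get?] using hd
  | cons e L ih =>
    simp only [List.map_cons, PySem.Dict.get?_mk_cons]
    by_cases hk : e.1 == ch
    · simp only [hk, if_pos]
      exact h e (List.mem_cons_self)
    · simp only [hk, if_neg, Bool.false_eq_true, not_false_iff]
      exact ih (fun e he => h e (List.mem_cons_of_mem _ he))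

lemma entries_ok : ∀ e ∈ pairedFont, charA e.2.1 = (e.2.2 ++ [0]).map colB := by decide

lemma charA_eq_charB (ch : Char) :
    charA (glyph ch)
      = ((((PySem.Dict.get? COLS ch).getD ((PySem.Dict.get? COLS ' ').getD [])) ++ [0]).map colB) := by
  have hsp : (PySem.Dict.get? FONT ' ').getD ([] : List String)
      = ["00","00","00","00","00"] := by decide
  have hspB : (PySem.Dict.get? COLS ' ').getD ([] : List Int) = [0, 0] := by decide
  unfold glyph
  rw [hsp, hspB, font_eq_paired, cols_eq_paired]
  exact block_eq_of_paired pairedFont entries_ok ["00","00","00","00","00"] [0, 0] (by decide) ch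

lemma A_eq_flatMap (l : List Char) (acc : List (List Int)) :
    l.foldl (fun cols ch =>
      let g := glyph ch
      let cols := (PySem.List.pyRange 0 (PySem.Str.len (PySem.List.pyGetD g 0 "")) 1).foldl
        (fun cols c => cols ++ [colA g c]) cols
      cols ++ [List.replicate 8 0]) acc
    = acc ++ l.flatMap (fun ch => charA (glyph ch)) := by
  induction l generalizing acc with
  | nil => simp
  | cons ch l ih =>
    simp only [List.foldl_cons, List.flatMap_cons]
    rw [ih, PySem.List.foldl_append_singleton_eq_map]
    simp [charA]

lemma B_eq_flatMap (l : List Char) (acc : List (List Int)) :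
    l.foldl (fun out ch =>
      (((PySem.Dict.get? COLS ch).getD ((PySem.Dict.get? COLS ' ').getD [])) ++ [0]).foldl
        (fun out m => out ++ [colB m]) out) acc
    = acc ++ l.flatMap (fun ch =>
        ((((PySem.Dict.get? COLS ch).getD ((PySem.Dict.get? COLS ' ').getD [])) ++ [0]).map colB)) := by
  induction l generalizing acc with
  | nil => simp
  | cons ch l ih =>
    simp only [List.foldl_cons, List.flatMap_cons]
    rw [PySem.List.foldl_append_singleton_eq_map, ih]
    simp

-- ===== VERDICT =====
theorem text_cols_spec : Claim_equal_text_cols := by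
  intro text _
  unfold Spec_text_cols text_cols text_cols_alt
  rw [A_eq_flatMap text.toList [], B_eq_flatMap text.toList []]
  simp only [List.nil_append]
  exact congrArg (fun f => List.flatMap f text.toList) (funext fun ch => charA_eq_charB ch)
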